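-- pv_equiv track=rewrite | github.com/rmacdonncha/ARC | src/manual_solve.py | solve_2281f1f4
-- ===== SOURCE A (Python) =====
-- def solve_2281f1f4(x):
--     #creating a new list from the first sublist of input array
--     list_x = x[0]
--
--     #creating a new list from the last element of every sublist
--     list_y = [sublist[-1] for sublist in x]
--
--     #create a new list of the postions of every non-zero element of list_x
--     x1 = []
--     for i in enumerate(list_x):
--         x1.append(i)
--     x1 = [x for (x,y) in x1 if y == 5]
--
--     #create a new list of the postions of every non-zero element of list_y
--     y1 = []
--     for i in enumerate(list_y):
--         y1.append(i)
--     y1 = [x for (x, y) in y1 if y == 5]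
--
--     # getting a list of coordinates by getting the intersection of x and y
--     coordinates = []
--     for i in x1:
--         for j in y1:
--             coordinates.append((i, j))
--
--     # updating our array by replacing the values of the coordinates of our intersections
--     for i,j in coordinates:
--             x[j][i] = 2
--
--     return x
-- ===== SOURCE B (Python) =====
-- def solve_2281f1f4(x):
--     # functional rebuild: no in-place writes; only return-value equivalence with A is claimed
--     cols = {c for c, v in enumerate(x[0]) if v == 5}
--     return [[2 if c in cols else v for c, v in enumerate(row)] if row[-1] == 5 else row
--             for row in x]
-- ===== Notes on version B (the rewrite author's own statement) =====
-- stated objective: alternative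
-- what changed: A collects marked-column and marked-row index lists, materializes their cross product and mutates the grid cell by cell; B never writes into the grid at all: it builds the marked-column set once and rebuilds the grid functionally in one comprehension, re-creating each marked row with 2 at marked columns and passing unmarked rows through unchanged.
import Mathlib
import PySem

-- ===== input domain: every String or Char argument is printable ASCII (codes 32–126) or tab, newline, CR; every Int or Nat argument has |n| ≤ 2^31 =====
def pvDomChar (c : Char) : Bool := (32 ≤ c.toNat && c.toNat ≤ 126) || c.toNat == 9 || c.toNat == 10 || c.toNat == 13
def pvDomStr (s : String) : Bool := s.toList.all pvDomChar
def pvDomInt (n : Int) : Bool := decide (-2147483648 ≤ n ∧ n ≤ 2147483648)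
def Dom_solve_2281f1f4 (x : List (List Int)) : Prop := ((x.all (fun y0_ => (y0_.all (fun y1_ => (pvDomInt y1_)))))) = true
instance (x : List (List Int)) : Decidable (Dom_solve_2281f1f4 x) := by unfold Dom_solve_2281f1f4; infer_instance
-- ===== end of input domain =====

-- B rebuilds the grid functionally (marked-column set + one comprehension) instead of A's index lists,
-- coordinate product and cell-by-cell mutation; A mutates x in place, B does not: equivalence is about the return value.

-- Python `g[j][i] = 2` in A (no-op outside range, which Pre_ rules out)
def pvWrite (g : List (List Int)) (j i : Int) : List (List Int) :=
  PySem.List.pySetD g j (PySem.List.pySetD (PySem.List.pyGetD g j []) i 2)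

-- ===== PORT A =====
def solve_2281f1f4 (x : List (List Int)) : List (List Int) :=
  let list_x := PySem.List.pyGetD x 0 []
  let list_y := x.map (fun sublist => PySem.List.pyGetD sublist (-1) 0)
  let x1 := ((PySem.List.enumerate list_x).filter (fun p => p.2 == 5)).map (fun p => p.1)
  let y1 := ((PySem.List.enumerate list_y).filter (fun p => p.2 == 5)).map (fun p => p.1)
  let coordinates := x1.foldl (fun acc i => y1.foldl (fun acc2 j => acc2 ++ [(i, j)]) acc) []
  coordinates.foldl (fun g p => pvWrite g p.2 p.1) x

-- ===== PORT B =====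
def solve_2281f1f4_alt (x : List (List Int)) : List (List Int) :=
  let cols : PySem.Set Int := PySem.Set.ofList
    (((PySem.List.enumerate (PySem.List.pyGetD x 0 [])).filter (fun p => p.2 == 5)).map (fun p => p.1))
  x.map (fun row =>
    if PySem.List.pyGetD row (-1) 0 == 5 then
      (PySem.List.enumerate row).map (fun p => if cols.contains p.1 then 2 else p.2)
    else row)

-- ===== PRECONDITION & SPEC =====
-- Pre_ excludes exactly where Python A raises: empty grid (x[0]), an empty row (row[-1]), and a marked
-- intersection (r,c) whose row r is too short for column c (IndexError on x[r][c] = 2).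
def Pre_solve_2281f1f4 (x : List (List Int)) : Prop :=
  x ≠ [] ∧ (∀ row ∈ x, row ≠ []) ∧
  ∀ r ∈ List.range x.length, ∀ c ∈ List.range (x.getD 0 []).length,
    ((x.getD r []).getLastD 0 = 5 ∧ (x.getD 0 []).getD c 0 = 5) → c < (x.getD r []).length
instance (x : List (List Int)) : Decidable (Pre_solve_2281f1f4 x) := by unfold Pre_solve_2281f1f4; infer_instance
def pvWitness_solve_2281f1f4 : List (List Int) := [[5, 5], [0, 5]]
def Spec_solve_2281f1f4 (x : List (List Int)) (out : List (List Int)) : Prop := out = solve_2281f1f4_alt x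
instance (x : List (List Int)) (out : List (List Int)) : Decidable (Spec_solve_2281f1f4 x out) := by unfold Spec_solve_2281f1f4; infer_instance

-- ===== CLAIM (what is proved, stated in full; the proofs are below) =====
def Claim_equal_solve_2281f1f4 : Prop := ∀ (x : List (List Int)), Dom_solve_2281f1f4 x → Pre_solve_2281f1f4 x → Spec_solve_2281f1f4 x (solve_2281f1f4 x)

-- ===== LEMMAS AND PROOFS =====

-- the write fold A reduces to
def pvF (ps : List (Int × Int)) (g : List (List Int)) : List (List Int) :=
  ps.foldl (fun g p => pvWrite g p.2 p.1) g

-- A's marked-column / marked-row index lists and coordinate list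
def pvCols (x : List (List Int)) : List Int :=
  ((PySem.List.enumerate (PySem.List.pyGetD x 0 [])).filter (fun p => p.2 == 5)).map (fun p => p.1)

def pvRows (x : List (List Int)) : List Int :=
  ((PySem.List.enumerate (x.map (fun sublist => PySem.List.pyGetD sublist (-1) 0))).filter
      (fun p => p.2 == 5)).map (fun p => p.1)

def pvLA (x : List (List Int)) : List (Int × Int) :=
  (pvCols x).foldl (fun acc i => (pvRows x).foldl (fun acc2 j => acc2 ++ [(i, j)]) acc) []

theorem pvF_nil (g : List (List Int)) : pvF [] g = g := rfl

theorem pvF_cons (p : Int × Int) (ps : List (Int × Int)) (g : List (List Int)) :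
    pvF (p :: ps) g = pvF ps (pvWrite g p.2 p.1) := rfl

theorem pvWrite_natCast (g : List (List Int)) (j i : Nat) :
    pvWrite g (j : Int) (i : Int) = g.set j ((g.getD j []).set i 2) := by
  simp [pvWrite]

theorem length_pvWrite (g : List (List Int)) (j i : Int) :
    (pvWrite g j i).length = g.length := by
  simp [pvWrite, PySem.List.length_pySetD]

theorem pv_getD_set (g : List (List Int)) (j : Nat) (row : List Int) (r : Nat) :
    (g.set j row).getD r [] = if j = r ∧ j < g.length then row else g.getD r [] := by
  unfold List.getD
  rw [List.getElem?_set]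
  by_cases h1 : j = r
  · subst h1
    by_cases h2 : j < g.length
    · simp [h2]
    · have hn : g[j]? = none := List.getElem?_eq_none (by omega)
      simp [h2]
  · simp [h1]

theorem pv_getD_set_int (l : List Int) (i c : Nat) (hc : c < l.length) :
    (l.set i 2).getD c 0 = if c = i then 2 else l.getD c 0 := by
  unfold List.getD
  rw [List.getElem?_set]
  by_cases h : i = c
  · subst h
    simp [hc]
  · have h' : ¬ c = i := fun hh => h hh.symm
    simp [h, h']

theorem rowlen_pvWrite (g : List (List Int)) (j i r : Nat) :
    ((pvWrite g (j : Int) (i : Int)).getD r []).length = (g.getD r []).length := by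
  rw [pvWrite_natCast, pv_getD_set]
  split_ifs with h
  · rw [List.length_set, h.1]
  · rfl

theorem getD_pvWrite_nat (g : List (List Int)) (j i r c : Nat)
    (hc : c < (g.getD r []).length) :
    ((pvWrite g (j : Int) (i : Int)).getD r []).getD c 0 =
      if r = j ∧ c = i then 2 else (g.getD r []).getD c 0 := by
  have hr : r < g.length := by
    by_contra hcon
    have hn : g[r]? = none := List.getElem?_eq_none (by omega)
    unfold List.getD at hc
    simp [hn] at hc
  rw [pvWrite_natCast, pv_getD_set]
  by_cases h : j = r ∧ j < g.length
  · rw [if_pos h]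
    obtain ⟨hjr, hjlen⟩ := h
    subst hjr
    rw [pv_getD_set_int _ i c hc]
    by_cases hci : c = i
    · rw [if_pos hci, if_pos ⟨rfl, hci⟩]
    · rw [if_neg hci, if_neg (fun hh => hci hh.2)]
  · rw [if_neg h]
    have hjr : ¬ j = r := fun hh => h ⟨hh, hh ▸ hr⟩
    rw [if_neg (fun hh => hjr hh.1.symm)]

theorem pvF_natCast (ps : List (Int × Int)) :
    (∀ p ∈ ps, ∃ i j : Nat, p = ((i : Int), (j : Int))) →
    ∀ (g : List (List Int)) (r : Nat),
      ((pvF ps g).getD r []).length = (g.getD r []).length := by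
  induction ps with
  | nil => intro _ g r; rfl
  | cons p ps ih =>
    intro hps g r
    obtain ⟨i, j, hp⟩ := hps p (List.mem_cons_self ..)
    rw [pvF_cons, ih (fun q hq => hps q (List.mem_cons_of_mem _ hq)), hp]
    exact rowlen_pvWrite g j i r

theorem pvF_length (ps : List (Int × Int)) (g : List (List Int)) :
    (pvF ps g).length = g.length := by
  induction ps generalizing g with
  | nil => rfl
  | cons p ps ih => rw [pvF_cons, ih, length_pvWrite]

theorem pvF_elem (ps : List (Int × Int))
    (hps : ∀ p ∈ ps, ∃ i j : Nat, p = ((i : Int), (j : Int))) :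
    ∀ (g : List (List Int)) (r c : Nat), c < (g.getD r []).length →
    ((pvF ps g).getD r []).getD c 0 =
      if ((c : Int), (r : Int)) ∈ ps then 2 else (g.getD r []).getD c 0 := by
  induction ps with
  | nil => intro g r c _; simp [pvF_nil]
  | cons p ps ih =>
    intro g r c hc
    obtain ⟨i, j, hp⟩ := hps p (List.mem_cons_self ..)
    subst hp
    have hps' : ∀ q ∈ ps, ∃ a b : Nat, q = ((a : Int), (b : Int)) :=
      fun q hq => hps q (List.mem_cons_of_mem _ hq)
    rw [pvF_cons]
    show ((pvF ps (pvWrite g (j : Int) (i : Int))).getD r []).getD c 0 = _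
    have hc2 : c < ((pvWrite g (j : Int) (i : Int)).getD r []).length := by
      rw [rowlen_pvWrite]; exact hc
    rw [ih hps' _ r c hc2, getD_pvWrite_nat g j i r c hc]
    simp only [List.mem_cons]
    by_cases hmem : ((c : Int), (r : Int)) ∈ ps
    · rw [if_pos hmem, if_pos (Or.inr hmem)]
    · rw [if_neg hmem]
      by_cases hji : r = j ∧ c = i
      · rw [if_pos hji, if_pos (Or.inl (by rw [hji.1, hji.2]))]
      · rw [if_neg hji, if_neg ?_]
        rintro (h | h)
        · obtain ⟨h1, h2⟩ := Prod.mk.inj h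
          exact hji ⟨by exact_mod_cast h2, by exact_mod_cast h1⟩
        · exact hmem h

-- structural equality from the pointwise characterisation
theorem pv_eq_of_char (a b : List (List Int))
    (hl : a.length = b.length)
    (hrl : ∀ r : Nat, (a.getD r []).length = (b.getD r []).length)
    (he : ∀ r c : Nat, c < (a.getD r []).length →
      (a.getD r []).getD c 0 = (b.getD r []).getD c 0) : a = b := by
  apply List.ext_getElem hl
  intro r h1 h2
  have hra : a.getD r [] = a[r] := List.getD_eq_getElem a [] h1
  have hrb : b.getD r [] = b[r] := List.getD_eq_getElem b [] h2
  apply List.ext_getElem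
  · have := hrl r; rwa [hra, hrb] at this
  · intro c hc1 hc2
    have := he r c (by rwa [hra])
    rwa [hra, hrb, List.getD_eq_getElem _ _ hc1, List.getD_eq_getElem _ _ hc2] at this

-- A's port is the write fold over its coordinate list
theorem pvA_eq (x : List (List Int)) : solve_2281f1f4 x = pvF (pvLA x) x := rfl

-- membership characterisation for A's marked-row list
theorem pv_mem_rows (x : List (List Int)) (r : Nat) :
    ((r : Int) ∈ pvRows x) ↔
      r < x.length ∧ (x.map (fun row => PySem.List.pyGetD row (-1) 0)).getD r 0 = 5 := by
  constructor
  · rintro h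
    simp only [pvRows, List.mem_map, List.mem_filter] at h
    obtain ⟨p, ⟨hpe, hp5⟩, hp1⟩ := h
    rw [PySem.List.mem_enumerate_iff] at hpe
    obtain ⟨k, hk, rfl⟩ := hpe
    simp only [zero_add] at hp1 hp5
    have hck : k = r := by exact_mod_cast hp1
    subst hck
    rw [List.length_map] at hk
    refine ⟨hk, ?_⟩
    rw [List.getD_eq_getElem _ _ (by simpa using hk)]
    simpa using hp5
  · rintro ⟨hk, h5⟩
    simp only [pvRows, List.mem_map, List.mem_filter]
    refine ⟨((r : Int), (x.map (fun row => PySem.List.pyGetD row (-1) 0))[r]'(by simpa using hk)),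
      ⟨?_, ?_⟩, rfl⟩
    · rw [PySem.List.mem_enumerate_iff]
      exact ⟨r, by simpa using hk, by simp⟩
    · rw [List.getD_eq_getElem _ _ (by simpa using hk)] at h5
      simpa using h5

theorem pvLA_eq_flatMap (x : List (List Int)) :
    pvLA x = (pvCols x).flatMap (fun i => (pvRows x).map (fun j => (i, j))) := by
  rw [pvLA]
  have : ∀ (l : List Int) (acc : List (Int × Int)),
      l.foldl (fun acc i => (pvRows x).foldl (fun acc2 j => acc2 ++ [(i, j)]) acc) acc =
        acc ++ l.flatMap (fun i => (pvRows x).map (fun j => (i, j))) := by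
    intro l
    induction l with
    | nil => intro acc; simp
    | cons a l ih =>
      intro acc
      rw [List.foldl_cons, ih, PySem.List.foldl_append_singleton_eq_map, List.flatMap_cons,
        List.append_assoc]
  rw [this, List.nil_append]

theorem pv_mem_LA (x : List (List Int)) (r c : Nat) :
    (((c : Int), (r : Int)) ∈ pvLA x) ↔ ((c : Int) ∈ pvCols x) ∧ ((r : Int) ∈ pvRows x) := by
  rw [pvLA_eq_flatMap]
  simp only [List.mem_flatMap, List.mem_map, Prod.mk.injEq]
  constructor
  · rintro ⟨i, hi, j, hj, h1, h2⟩
    exact ⟨h1 ▸ hi, h2 ▸ hj⟩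
  · rintro ⟨hc, hr⟩
    exact ⟨_, hc, _, hr, rfl, rfl⟩

theorem pv_hps_LA (x : List (List Int)) :
    ∀ p ∈ pvLA x, ∃ i j : Nat, p = ((i : Int), (j : Int)) := by
  intro p hp
  rw [pvLA_eq_flatMap] at hp
  simp only [List.mem_flatMap, List.mem_map] at hp
  obtain ⟨i, hi, j, hj, rfl⟩ := hp
  simp only [pvCols, List.mem_map, List.mem_filter] at hi
  obtain ⟨q, ⟨hqe, _⟩, hq1⟩ := hi
  rw [PySem.List.mem_enumerate_iff] at hqe
  obtain ⟨k, hk, rfl⟩ := hqe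
  simp only [pvRows, List.mem_map, List.mem_filter] at hj
  obtain ⟨q', ⟨hqe', _⟩, hq1'⟩ := hj
  rw [PySem.List.mem_enumerate_iff] at hqe'
  obtain ⟨k', hk', rfl⟩ := hqe'
  exact ⟨k, k', by simp [← hq1, ← hq1']⟩

-- B-side characterisation: row shape and cell values of the rebuilt grid
theorem pvB_length (x : List (List Int)) : (solve_2281f1f4_alt x).length = x.length := by
  simp [solve_2281f1f4_alt]

theorem pvB_getD_row (x : List (List Int)) (r : Nat) (hr : r < x.length) :
    (solve_2281f1f4_alt x).getD r [] =
      if PySem.List.pyGetD x[r] (-1) 0 == 5 then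
        (PySem.List.enumerate x[r]).map
          (fun p => if (PySem.Set.ofList (pvCols x)).contains p.1 then 2 else p.2)
      else x[r] := by
  show (x.map _).getD r [] = _
  rw [List.getD_eq_getElem _ _ (by simpa using hr), List.getElem_map]
  rfl

theorem pvB_rowlen (x : List (List Int)) (r : Nat) :
    ((solve_2281f1f4_alt x).getD r []).length = (x.getD r []).length := by
  by_cases hr : r < x.length
  · rw [pvB_getD_row x r hr, List.getD_eq_getElem _ _ hr]
    split_ifs with h
    · simp [PySem.List.length_enumerate]
    · rfl
  · have h1 : (solve_2281f1f4_alt x)[r]? = none :=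
      List.getElem?_eq_none (by rw [pvB_length]; omega)
    have h2 : x[r]? = none := List.getElem?_eq_none (by omega)
    unfold List.getD
    rw [h1, h2]

theorem pvB_elem (x : List (List Int)) (r c : Nat) (hc : c < (x.getD r []).length) :
    ((solve_2281f1f4_alt x).getD r []).getD c 0 =
      if (PySem.List.pyGetD (x.getD r []) (-1) 0 == 5 ∧ ((c : Int) ∈ pvCols x)) then 2
      else (x.getD r []).getD c 0 := by
  have hr : r < x.length := by
    by_contra hcon
    have hn : x[r]? = none := List.getElem?_eq_none (by omega)
    unfold List.getD at hc
    simp [hn] at hc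
  have hx : x.getD r [] = x[r] := List.getD_eq_getElem x [] hr
  rw [hx] at hc
  rw [hx, pvB_getD_row x r hr]
  by_cases hm : PySem.List.pyGetD x[r] (-1) 0 == 5
  · rw [if_pos hm]
    have hc' : c < x[r].length := hc
    have hce : c < (PySem.List.enumerate x[r]).length := by
      rwa [PySem.List.length_enumerate]
    rw [List.getD_eq_getElem _ _ (by simpa using hce), List.getElem_map,
      PySem.List.getElem_enumerate]
    have hmem : (PySem.Set.ofList (pvCols x)).contains ((0 : Int) + (c : Nat)) =
        decide ((c : Int) ∈ pvCols x) := by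
      simp only [zero_add]
      by_cases h : (c : Int) ∈ pvCols x
      · simp [PySem.Set.contains, PySem.Set.mem_ofList, h]
      · simp [PySem.Set.contains, PySem.Set.mem_ofList, h]
    rw [hmem]
    by_cases h : (c : Int) ∈ pvCols x
    · rw [if_pos (by simp [h]), if_pos ⟨by simpa using hm, h⟩]
    · rw [if_neg (by simp [h]), if_neg (fun hh => h hh.2), List.getD_eq_getElem _ _ hc']
  · rw [if_neg hm, if_neg (fun hh => hm (by simpa using hh.1))]

-- ===== VERDICT (by name: the statements are the Claim_ definitions above) =====
theorem solve_2281f1f4_spec : Claim_equal_solve_2281f1f4 := by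
  intro x _dom _pre
  show solve_2281f1f4 x = solve_2281f1f4_alt x
  rw [pvA_eq]
  apply pv_eq_of_char
  · rw [pvF_length, pvB_length]
  · intro r
    rw [pvF_natCast _ (pv_hps_LA x) x r, pvB_rowlen]
  · intro r c hc
    have hc' : c < (x.getD r []).length := by
      rwa [pvF_natCast _ (pv_hps_LA x) x r] at hc
    rw [pvF_elem _ (pv_hps_LA x) x r c hc', pvB_elem x r c hc']
    have hr : r < x.length := by
      by_contra hcon
      have hn : x[r]? = none := List.getElem?_eq_none (by omega)
      unfold List.getD at hc'
      simp [hn] at hc'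
    have hmap : (x.map (fun row => PySem.List.pyGetD row (-1) 0)).getD r 0 =
        PySem.List.pyGetD (x.getD r []) (-1) 0 := by
      rw [List.getD_eq_getElem _ _ (by simpa using hr), List.getElem_map,
        List.getD_eq_getElem x [] hr]
    by_cases h : ((c : Int), (r : Int)) ∈ pvLA x
    · rw [if_pos h]
      obtain ⟨hcc, hrr⟩ := (pv_mem_LA x r c).mp h
      have h5 := ((pv_mem_rows x r).mp hrr).2
      rw [if_pos ⟨by simp only [beq_iff_eq]; exact hmap.symm.trans h5, hcc⟩]
    · rw [if_neg h, if_neg ?_]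
      rintro ⟨h5, hcc⟩
      apply h
      rw [pv_mem_LA]
      refine ⟨hcc, (pv_mem_rows x r).mpr ⟨hr, ?_⟩⟩
      rw [hmap]
      simpa using h5
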